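-- pv_equiv track=rewrite | github.com/lcqlalala/grad_diagSVD | SVDLLM.py | _split_module_ranks
-- ===== SOURCE A (Python) =====
-- def _split_module_ranks(ranks_layer):
--     attn_ranks = {}
--     mlp_ranks = {}
--     if not ranks_layer:
--         return attn_ranks, mlp_ranks
--     for name, r in ranks_layer.items():
--         if "q_proj" in name:
--             attn_ranks["q_proj"] = r
--         elif "k_proj" in name:
--             attn_ranks["k_proj"] = r
--         elif "v_proj" in name:
--             attn_ranks["v_proj"] = r
--         elif "o_proj" in name:
--             attn_ranks["o_proj"] = r
--         elif "out_proj" in name: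
--             attn_ranks["out_proj"] = r
--         elif "gate_proj" in name:
--             mlp_ranks["gate_proj"] = r
--         elif "up_proj" in name:
--             mlp_ranks["up_proj"] = r
--         elif "down_proj" in name:
--             mlp_ranks["down_proj"] = r
--         elif "fc1" in name:
--             mlp_ranks["fc1"] = r
--         elif "fc2" in name:
--             mlp_ranks["fc2"] = r
--     return attn_ranks, mlp_ranks
-- ===== SOURCE B (Python) =====
-- _ATTN = ("q_proj", "k_proj", "v_proj", "o_proj", "out_proj")
-- _MLP = ("gate_proj", "up_proj", "down_proj", "fc1", "fc2")
--
--
-- def _classify(name):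
--     return next((k for k in _ATTN + _MLP if k in name), None)
--
--
-- def _split_module_ranks(ranks_layer):
--     classified = [(_classify(name), r) for name, r in ranks_layer.items()]
--     attn_ranks = {k: r for k, r in classified if k in _ATTN}
--     mlp_ranks = {k: r for k, r in classified if k in _MLP}
--     return attn_ranks, mlp_ranks
-- ===== Notes on version B (the rewrite author's own statement) =====
-- stated objective: idiomatic
-- what changed: Replaces the ten-branch elif cascade filling two accumulator dicts in one dispatch loop by a classify-then-filter pipeline: each name is first mapped to its canonical key by a first-match scan over one ordered rule table, and the two dicts are then built by separate dict comprehensions over the classified list.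
import Mathlib
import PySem

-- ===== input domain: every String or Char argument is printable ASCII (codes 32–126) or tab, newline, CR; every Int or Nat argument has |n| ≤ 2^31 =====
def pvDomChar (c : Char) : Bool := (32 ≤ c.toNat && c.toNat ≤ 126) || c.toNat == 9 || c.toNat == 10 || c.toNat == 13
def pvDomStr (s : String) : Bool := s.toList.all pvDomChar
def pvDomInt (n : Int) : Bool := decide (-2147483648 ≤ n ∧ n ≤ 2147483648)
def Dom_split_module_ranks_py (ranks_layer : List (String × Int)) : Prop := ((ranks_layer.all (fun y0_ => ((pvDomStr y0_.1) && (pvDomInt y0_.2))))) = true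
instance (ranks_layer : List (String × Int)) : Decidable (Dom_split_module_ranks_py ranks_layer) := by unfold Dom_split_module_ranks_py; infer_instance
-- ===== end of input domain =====

-- B replaces A's ten-branch elif cascade (one loop dispatching into two accumulator dicts) by a
-- classify-then-filter pipeline over a single ordered rule table; same cost, more idiomatic.

-- ===== PORT A =====
-- loop body of A's for-loop: the elif cascade over (attn_ranks, mlp_ranks)
def pvStepA (st : PySem.Dict String Int × PySem.Dict String Int) (p : String × Int) :
    PySem.Dict String Int × PySem.Dict String Int :=
  if PySem.Str.isIn "q_proj" p.1 then (st.1.insert "q_proj" p.2, st.2)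
  else if PySem.Str.isIn "k_proj" p.1 then (st.1.insert "k_proj" p.2, st.2)
  else if PySem.Str.isIn "v_proj" p.1 then (st.1.insert "v_proj" p.2, st.2)
  else if PySem.Str.isIn "o_proj" p.1 then (st.1.insert "o_proj" p.2, st.2)
  else if PySem.Str.isIn "out_proj" p.1 then (st.1.insert "out_proj" p.2, st.2)
  else if PySem.Str.isIn "gate_proj" p.1 then (st.1, st.2.insert "gate_proj" p.2)
  else if PySem.Str.isIn "up_proj" p.1 then (st.1, st.2.insert "up_proj" p.2)
  else if PySem.Str.isIn "down_proj" p.1 then (st.1, st.2.insert "down_proj" p.2)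
  else if PySem.Str.isIn "fc1" p.1 then (st.1, st.2.insert "fc1" p.2)
  else if PySem.Str.isIn "fc2" p.1 then (st.1, st.2.insert "fc2" p.2)
  else st

def split_module_ranks_py (ranks_layer : List (String × Int)) :
    (List (String × Int)) × (List (String × Int)) :=
  let attn_ranks : PySem.Dict String Int := PySem.Dict.empty
  let mlp_ranks : PySem.Dict String Int := PySem.Dict.empty
  if ranks_layer = [] then (attn_ranks.items, mlp_ranks.items)
  else
    let st := ranks_layer.foldl pvStepA (attn_ranks, mlp_ranks)
    (st.1.items, st.2.items)

-- ===== PORT B =====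
def pvAttnKeys : List String := ["q_proj", "k_proj", "v_proj", "o_proj", "out_proj"]
def pvMlpKeys : List String := ["gate_proj", "up_proj", "down_proj", "fc1", "fc2"]

-- _classify: first rule in the ordered table whose key occurs in name, else none
def pvClassify (name : String) : Option String :=
  (pvAttnKeys ++ pvMlpKeys).find? (fun k => PySem.Str.isIn k name)

-- one step of the dict comprehension {k: r for k, r in classified if k in keys}
def pvBuildStep (keys : List String) (d : PySem.Dict String Int) (kr : Option String × Int) :
    PySem.Dict String Int :=
  match kr.1 with
  | some k => if k ∈ keys then d.insert k kr.2 else d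
  | none => d

def pvBuild (keys : List String) (classified : List (Option String × Int)) :
    PySem.Dict String Int :=
  classified.foldl (pvBuildStep keys) PySem.Dict.empty

def split_module_ranks_py_alt (ranks_layer : List (String × Int)) :
    (List (String × Int)) × (List (String × Int)) :=
  let classified := ranks_layer.map (fun p => (pvClassify p.1, p.2))
  ((pvBuild pvAttnKeys classified).items, (pvBuild pvMlpKeys classified).items)

-- ===== PRECONDITION & SPEC =====
def Spec_split_module_ranks_py (ranks_layer : List (String × Int)) (out : (List (String × Int)) × (List (String × Int))) : Prop := out = split_module_ranks_py_alt ranks_layer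
instance (ranks_layer : List (String × Int)) (out : (List (String × Int)) × (List (String × Int))) : Decidable (Spec_split_module_ranks_py ranks_layer out) := by unfold Spec_split_module_ranks_py; infer_instance

-- ===== CLAIM (what is proved, stated in full; the proofs are below) =====
def Claim_equal_split_module_ranks_py : Prop := ∀ (ranks_layer : List (String × Int)), Dom_split_module_ranks_py ranks_layer → Spec_split_module_ranks_py ranks_layer (split_module_ranks_py ranks_layer)

-- ===== LEMMAS AND PROOFS =====

-- A's cascade step equals B's two comprehension steps applied to the classified pair
theorem pvStep_pair (a m : PySem.Dict String Int) (name : String) (r : Int) :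
    pvStepA (a, m) (name, r) =
      (pvBuildStep pvAttnKeys a (pvClassify name, r), pvBuildStep pvMlpKeys m (pvClassify name, r)) := by
  unfold pvStepA pvBuildStep pvClassify pvAttnKeys pvMlpKeys
  simp only [List.cons_append, List.nil_append, List.find?]
  cases hb1 : PySem.Str.isIn "q_proj" name with
  | true => rfl
  | false =>
    cases hb2 : PySem.Str.isIn "k_proj" name with
    | true => rfl
    | false =>
      cases hb3 : PySem.Str.isIn "v_proj" name with
      | true => rfl
      | false =>
        cases hb4 : PySem.Str.isIn "o_proj" name with
        | true => rfl
        | false =>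
          cases hb5 : PySem.Str.isIn "out_proj" name with
          | true => rfl
          | false =>
            cases hb6 : PySem.Str.isIn "gate_proj" name with
            | true => rfl
            | false =>
              cases hb7 : PySem.Str.isIn "up_proj" name with
              | true => rfl
              | false =>
                cases hb8 : PySem.Str.isIn "down_proj" name with
                | true => rfl
                | false =>
                  cases hb9 : PySem.Str.isIn "fc1" name with
                  | true => rfl
                  | false =>
                    cases hb10 : PySem.Str.isIn "fc2" name with
                    | true => rfl
                    | false =>
                      rfl

-- A's single fold over the pair equals the pair of B's folds over the classified list
theorem pvFold_pair (l : List (String × Int)) (a m : PySem.Dict String Int) :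
    l.foldl pvStepA (a, m) =
      ((l.map (fun p => (pvClassify p.1, p.2))).foldl (pvBuildStep pvAttnKeys) a,
       (l.map (fun p => (pvClassify p.1, p.2))).foldl (pvBuildStep pvMlpKeys) m) := by
  induction l generalizing a m with
  | nil => rfl
  | cons p t ih =>
    rcases p with ⟨name, r⟩
    simp only [List.foldl_cons, List.map_cons, pvStep_pair]
    exact ih _ _

-- ===== VERDICT (by name: the statement is the Claim_ definition above) =====
theorem split_module_ranks_py_spec : Claim_equal_split_module_ranks_py := by
  intro ranks_layer _
  unfold Spec_split_module_ranks_py split_module_ranks_py split_module_ranks_py_alt pvBuild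
  by_cases hr : ranks_layer = []
  · subst hr; rfl
  · simp only [hr, if_false, pvFold_pair]
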